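-- pv_equiv track=rewrite | github.com/isomjd-code/courthand | train_kenlm_with_placeholders.py | _word_is_placeholder
-- ===== SOURCE A (Python) =====
-- def _word_is_placeholder(word: str, placeholder: str) -> bool:
--     """Check if a word is the placeholder (including with punctuation attached)."""
--     if word == placeholder:
--         return True
--     # Also check for placeholder with trailing punctuation
--     if word.startswith(placeholder) and len(word) > len(placeholder):
--         trailing = word[len(placeholder):]
--         # If what follows is only punctuation, it's still the placeholder
--         if all(c in ',.;:!?' for c in trailing):
--             return True
--     return False
-- ===== SOURCE B (Python) =====
-- def _word_is_placeholder(word: str, placeholder: str) -> bool: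
--     """Check if a word is the placeholder (including with punctuation attached)."""
--     w = word
--     while len(w) > len(placeholder) and w[-1] in ',.;:!?':
--         w = w[:-1]
--     return w == placeholder
-- ===== Notes on version B (the rewrite author's own statement) =====
-- stated objective: alternative
-- what changed: Instead of A's forward check (exact equality, else startswith + scan of the trailing slice), B trims punctuation off the word's right end one character at a time, never shrinking below the placeholder's length, and finishes with a single equality test.
import Mathlib
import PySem

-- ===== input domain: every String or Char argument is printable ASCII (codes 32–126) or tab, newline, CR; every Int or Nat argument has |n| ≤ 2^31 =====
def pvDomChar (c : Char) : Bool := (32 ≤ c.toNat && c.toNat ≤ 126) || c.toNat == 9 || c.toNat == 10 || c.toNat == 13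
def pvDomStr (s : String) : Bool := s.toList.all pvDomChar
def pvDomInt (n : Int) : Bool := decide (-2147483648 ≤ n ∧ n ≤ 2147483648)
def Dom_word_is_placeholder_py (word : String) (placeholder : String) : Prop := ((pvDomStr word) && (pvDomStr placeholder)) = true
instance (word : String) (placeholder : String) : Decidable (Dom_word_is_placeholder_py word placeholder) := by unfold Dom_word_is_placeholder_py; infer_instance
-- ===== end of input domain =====

-- B trims punctuation off the word's right end one character at a time (never below the
-- placeholder's length) and ends with a single equality test, instead of A's forward
-- startswith + trailing-slice scan (objective: alternative).

-- the Python literal ',.;:!?' as the set of characters it contains (membership 'c in ',.;:!?'')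
def pyPunct : List Char := [',', '.', ';', ':', '!', '?']

-- ===== PORT A =====
def word_is_placeholder_py (word : String) (placeholder : String) : Bool :=
  if word == placeholder then true
  else if PySem.Str.startswith word placeholder
          && decide (PySem.Str.len word > PySem.Str.len placeholder) then
    -- trailing = word[len(placeholder):]
    let trailing := PySem.List.slice word.toList (some (PySem.Str.len placeholder : Int)) none
    -- all(c in ',.;:!?' for c in trailing)
    if trailing.all (fun c => c ∈ pyPunct) then true else false
  else false

-- ===== PORT B =====
-- B's loop 'while len(w) > len(placeholder) and w[-1] in ',.;:!?': w = w[:-1]' removes the LAST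
-- character each step; it is transcribed as this structural recursion on the word's REVERSED
-- character list (the head of the reversed list is w[-1]); exact step for step.
def trimRevB (n : Nat) : List Char → List Char
  | [] => []
  | c :: rest =>
    if n < rest.length + 1 ∧ c ∈ pyPunct then trimRevB n rest
    else c :: rest

def word_is_placeholder_py_alt (word : String) (placeholder : String) : Bool :=
  -- final 'return w == placeholder'
  decide ((trimRevB placeholder.toList.length word.toList.reverse).reverse = placeholder.toList)

-- ===== PRECONDITION & SPEC =====
def Spec_word_is_placeholder_py (word : String) (placeholder : String) (out : Bool) : Prop := out = word_is_placeholder_py_alt word placeholder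
instance (word : String) (placeholder : String) (out : Bool) : Decidable (Spec_word_is_placeholder_py word placeholder out) := by unfold Spec_word_is_placeholder_py; infer_instance

-- ===== CLAIM (what is proved, stated in full; the proofs are below) =====
def Claim_equal_word_is_placeholder_py : Prop := ∀ (word : String) (placeholder : String), Dom_word_is_placeholder_py word placeholder → Spec_word_is_placeholder_py word placeholder (word_is_placeholder_py word placeholder)

-- ===== LEMMAS AND PROOFS =====

-- the trimmed-off prefix of the reversed list is all punctuation
theorem trimRevB_decomp (n : Nat) (r : List Char) :
    ∃ d, r = d ++ trimRevB n r ∧ ∀ c ∈ d, c ∈ pyPunct := by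
  induction r with
  | nil => exact ⟨[], rfl, by simp⟩
  | cons c rest ih =>
    by_cases h : n < rest.length + 1 ∧ c ∈ pyPunct
    · obtain ⟨d, hr, hd⟩ := ih
      refine ⟨c :: d, ?_, ?_⟩
      · simp [trimRevB, h, ← hr]
      · intro x hx
        rcases List.mem_cons.mp hx with rfl | hx
        · exact h.2
        · exact hd x hx
    · refine ⟨[], ?_, by simp⟩
      simp only [List.nil_append, trimRevB]
      rw [if_neg h]

-- trimming stops exactly at the placeholder when the word is placeholder ++ punctuation
theorem trimRevB_of_punct (pl : List Char) (t : List Char) (ht : ∀ c ∈ t, c ∈ pyPunct) :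
    trimRevB pl.length (t ++ pl.reverse) = pl.reverse := by
  induction t with
  | nil =>
    cases hpl : pl.reverse with
    | nil => simp [trimRevB]
    | cons c rest =>
      have hlen : rest.length + 1 = pl.length := by
        have := congrArg List.length hpl
        simpa using this.symm
      have hcond : ¬ (pl.length < rest.length + 1 ∧ c ∈ pyPunct) := by
        rintro ⟨h1, _⟩; omega
      simp only [List.nil_append, trimRevB]
      rw [if_neg hcond]
  | cons c t ih =>
    have hc : c ∈ pyPunct := ht c (by simp)
    have hlen : pl.length < (t ++ pl.reverse).length + 1 := by
      simp
    simp only [List.cons_append, trimRevB, hlen, hc, and_self, if_pos]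
    exact ih (fun x hx => ht x (by simp [hx]))

-- B is true iff the word is the placeholder followed by punctuation only
theorem alt_iff (word placeholder : String) :
    word_is_placeholder_py_alt word placeholder = true ↔
      ∃ s, word.toList = placeholder.toList ++ s ∧ ∀ c ∈ s, c ∈ pyPunct := by
  unfold word_is_placeholder_py_alt
  rw [decide_eq_true_iff]
  constructor
  · intro h
    obtain ⟨d, hr, hd⟩ := trimRevB_decomp placeholder.toList.length word.toList.reverse
    have hres : trimRevB placeholder.toList.length word.toList.reverse = placeholder.toList.reverse := by
      have := congrArg List.reverse h
      simpa using this
    rw [hres] at hr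
    refine ⟨d.reverse, ?_, ?_⟩
    · have := congrArg List.reverse hr
      simpa using this
    · intro c hc; exact hd c (by simpa using hc)
  · rintro ⟨s, hw, hs⟩
    have hrev : word.toList.reverse = s.reverse ++ placeholder.toList.reverse := by
      simp [hw]
    rw [hrev, trimRevB_of_punct _ _ (fun c hc => hs c (by simpa using hc))]
    simp

-- A is true iff the word is the placeholder followed by punctuation only
theorem a_iff (word placeholder : String) :
    word_is_placeholder_py word placeholder = true ↔
      ∃ s, word.toList = placeholder.toList ++ s ∧ ∀ c ∈ s, c ∈ pyPunct := by
  unfold word_is_placeholder_py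
  simp only [PySem.Str.len_eq, PySem.List.slice_from_natCast]
  by_cases h : word = placeholder
  · subst h
    simp
  · have hne : (word == placeholder) = false := by simp [h]
    rw [hne]
    simp only [Bool.false_eq_true, if_false]
    constructor
    · intro hA
      split_ifs at hA with h1 h2
      · have hpre : placeholder.toList <+: word.toList := by
          have := h1
          rw [Bool.and_eq_true, decide_eq_true_iff] at this
          exact (PySem.Chars.startswith_iff _ _).mp (by
            simpa [PySem.Str.startswith] using this.1)
        refine ⟨word.toList.drop placeholder.length, ?_, ?_⟩
        · have htake : word.toList.take placeholder.length = placeholder.toList := by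
            simpa using (List.prefix_iff_eq_take.mp hpre).symm
          conv_lhs => rw [← List.take_append_drop placeholder.length word.toList]
          rw [htake]
        · intro c hc
          have := List.all_eq_true.mp h2 c (by simpa using hc)
          simpa using this
    · rintro ⟨s, hw, hs⟩
      have hpre : placeholder.toList <+: word.toList := ⟨s, hw.symm⟩
      have hsne : s ≠ [] := by
        intro hsnil
        apply h
        apply String.toList_inj.mp
        simp [hw, hsnil]
      have hlen : placeholder.length < word.length := by
        have := congrArg List.length hw
        simp only [List.length_append, String.length_toList] at this
        have : word.length = placeholder.length + s.length := by simpa using this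
        have hs0 : 0 < s.length := List.length_pos_iff.mpr hsne
        omega
      have hdrop : word.toList.drop placeholder.length = s := by
        rw [hw]; simp
      split_ifs with hc1 hc2
      · rfl
      · exfalso
        apply hc2
        rw [String.length_toList, hdrop, List.all_eq_true]
        intro c hc
        simpa using hs c hc
      · exfalso
        apply hc1
        rw [Bool.and_eq_true, decide_eq_true_iff]
        refine ⟨?_, ?_⟩
        · simpa [PySem.Chars.startswith_iff] using hpre
        · simp only [String.length_toList]
          exact_mod_cast hlen

theorem word_is_placeholder_eq (word placeholder : String) :
    word_is_placeholder_py word placeholder = word_is_placeholder_py_alt word placeholder := by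
  rcases hB : word_is_placeholder_py_alt word placeholder with _ | _
  · rcases hA : word_is_placeholder_py word placeholder with _ | _
    · rfl
    · exact absurd ((alt_iff word placeholder).mpr ((a_iff word placeholder).mp hA)) (by simp [hB])
  · exact (a_iff word placeholder).mpr ((alt_iff word placeholder).mp hB)

-- ===== VERDICT (by name: the statement is the Claim_ definition above) =====
theorem word_is_placeholder_py_spec : Claim_equal_word_is_placeholder_py := by
  intro word placeholder _
  unfold Spec_word_is_placeholder_py
  exact word_is_placeholder_eq word placeholder
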